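-- pv_equiv track=rewrite | github.com/dev-mikevvl-ms/PyDev.03.HW | hw_02.py | tGetIsValiSep_fef
-- ===== SOURCE A (Python) =====
-- def tGetIsValiSep_fef(laTs_s, laSep_t=(',', ';', '/')):
--   # if not isinstance(laTs_s, str):
--   #   raise TypeError(f"laTs_s should be string, but NOW {type(laTs_s).__name__}.")
--   loCoSepIt2S_t = tuple(laTs_s.count(_el) for _el in laSep_t)
--   loAllSepCoSum_i = sum(loCoSepIt2S_t)
--   if loAllSepCoSum_i == 0: return None
--   else:
--     for l_s, l_co in zip(laSep_t, loCoSepIt2S_t):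
--       if l_co == 0: continue
--       elif l_co != loAllSepCoSum_i:
--         raise ValueError(f"In str:'{laTs_s}' there should be used only one of {laSep_t} separator.")
--       else: return l_s
-- ===== SOURCE B (Python) =====
-- def tGetIsValiSep_fef(laTs_s, laSep_t=(',', ';', '/')):
--   used = [l_s for l_s in laSep_t if l_s in laTs_s]
--   if not used:
--     return None
--   if len(used) == 1:
--     return used[0]
--   raise ValueError(f"In str:'{laTs_s}' there should be used only one of {laSep_t} separator.")
-- ===== Notes on version B (the rewrite author's own statement) =====
-- stated objective: simpler
-- what changed: B drops the per-separator count pass, the sum and the zip loop entirely: it filters the separators that occur in the string at all (substring membership) and decides from that list's length alone (empty -> None, one -> that separator, more -> the same ValueError).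
import Mathlib
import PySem

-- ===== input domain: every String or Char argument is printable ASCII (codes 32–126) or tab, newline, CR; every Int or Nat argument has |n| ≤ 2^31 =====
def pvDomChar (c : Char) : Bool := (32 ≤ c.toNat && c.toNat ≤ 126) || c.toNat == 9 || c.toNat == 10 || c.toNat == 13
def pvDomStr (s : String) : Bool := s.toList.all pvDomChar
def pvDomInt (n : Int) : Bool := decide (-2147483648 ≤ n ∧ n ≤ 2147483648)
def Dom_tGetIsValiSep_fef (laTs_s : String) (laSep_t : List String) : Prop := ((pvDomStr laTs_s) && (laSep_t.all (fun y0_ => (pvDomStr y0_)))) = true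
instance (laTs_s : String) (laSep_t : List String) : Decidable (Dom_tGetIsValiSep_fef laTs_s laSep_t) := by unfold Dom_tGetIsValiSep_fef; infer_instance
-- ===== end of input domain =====

-- B replaces A's per-separator count pass + sum + zip loop by a single membership filter (simpler,
-- same cost class). Equivalence of RETURN values; where Python A raises ValueError (two separators
-- both occurring) both Pythons raise the identical error and those inputs are excluded by Pre_.

-- ===== PORT A =====
-- the 'for l_s, l_co in zip(...)' loop; 'none' in the middle branch stands for the ValueError raise
-- (such inputs are outside Pre_)
def tGetLoop : List (String × Nat) → Nat → Option String
  | [], _ => none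
  | (l_s, l_co) :: rest, total =>
    if l_co = 0 then tGetLoop rest total
    else if l_co ≠ total then none   -- raise ValueError (excluded by Pre_)
    else some l_s

def tGetIsValiSep_fef (laTs_s : String) (laSep_t : List String) : Option String :=
  let loCoSepIt2S_t := laSep_t.map (fun el => PySem.Str.count laTs_s el)
  let loAllSepCoSum_i := loCoSepIt2S_t.sum
  if loAllSepCoSum_i = 0 then none
  else tGetLoop (laSep_t.zip loCoSepIt2S_t) loAllSepCoSum_i

-- ===== PORT B =====
def tGetIsValiSep_fef_alt (laTs_s : String) (laSep_t : List String) : Option String :=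
  let used := laSep_t.filter (fun l_s => PySem.Str.isIn l_s laTs_s)
  if used.isEmpty then none
  else if used.length = 1 then used.head?
  else none   -- raise ValueError (excluded by Pre_)

-- ===== PRECONDITION & SPEC =====
-- Pre_ excludes exactly the inputs on which Python A raises ValueError: two or more entries of
-- laSep_t (counted with multiplicity) occurring as substrings of laTs_s.  A returns normally on
-- every input admitted here.
def Pre_tGetIsValiSep_fef (laTs_s : String) (laSep_t : List String) : Prop :=
  laSep_t.countP (fun l_s => PySem.Str.isIn l_s laTs_s) ≤ 1

instance (laTs_s : String) (laSep_t : List String) : Decidable (Pre_tGetIsValiSep_fef laTs_s laSep_t) := by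
  unfold Pre_tGetIsValiSep_fef; infer_instance

def pvWitness_tGetIsValiSep_fef : String × List String := ("a,b", [",", ";", "/"])

def Spec_tGetIsValiSep_fef (laTs_s : String) (laSep_t : List String) (out : Option String) : Prop := out = tGetIsValiSep_fef_alt laTs_s laSep_t
instance (laTs_s : String) (laSep_t : List String) (out : Option String) : Decidable (Spec_tGetIsValiSep_fef laTs_s laSep_t out) := by unfold Spec_tGetIsValiSep_fef; infer_instance

-- ===== CLAIM (what is proved, stated in full; the proofs are below) =====
def Claim_equal_tGetIsValiSep_fef : Prop := ∀ (laTs_s : String) (laSep_t : List String), Dom_tGetIsValiSep_fef laTs_s laSep_t → Pre_tGetIsValiSep_fef laTs_s laSep_t → Spec_tGetIsValiSep_fef laTs_s laSep_t (tGetIsValiSep_fef laTs_s laSep_t)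

-- ===== LEMMAS AND PROOFS =====

-- count.go never decreases the accumulator
lemma tGet_go_ge (sub : List Char) : ∀ (fuel : Nat) (s : List Char) (acc : Nat),
    acc ≤ PySem.Chars.count.go sub fuel s acc := by
  intro fuel
  induction fuel with
  | zero => intro s acc; simp [PySem.Chars.count.go]
  | succ n ih =>
    intro s acc
    cases s with
    | nil => simp [PySem.Chars.count.go]
    | cons h t =>
      simp only [PySem.Chars.count.go]
      split
      · exact le_trans (Nat.le_succ acc) (ih _ _)
      · exact ih _ _

lemma tGet_go_zero_iff (sub : List Char) (hsub : sub ≠ []) :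
    ∀ (fuel : Nat) (s : List Char), s.length ≤ fuel →
      (PySem.Chars.count.go sub fuel s 0 = 0 ↔ ¬ sub <:+: s) := by
  intro fuel
  induction fuel with
  | zero =>
    intro s hs
    have hnil : s = [] := List.eq_nil_of_length_eq_zero (Nat.le_zero.mp hs)
    subst hnil
    simp [PySem.Chars.count.go, List.infix_nil, hsub]
  | succ n ih =>
    intro s hs
    cases s with
    | nil => simp [PySem.Chars.count.go, List.infix_nil, hsub]
    | cons h t =>
      simp only [PySem.Chars.count.go]
      by_cases hp : sub.isPrefixOf (h :: t) = true
      · rw [if_pos hp]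
        have hpre : sub <+: (h :: t) := List.isPrefixOf_iff_prefix.mp hp
        constructor
        · intro hz
          have hge := tGet_go_ge sub n ((h :: t).drop sub.length) (0 + 1)
          omega
        · intro hninf
          exact absurd hpre.isInfix hninf
      · rw [if_neg hp]
        have ht : t.length ≤ n := by
          have := hs; simp only [List.length_cons] at this; omega
        rw [ih t ht, List.infix_cons_iff]
        constructor
        · intro hni h2
          rcases h2 with h2 | h2
          · exact hp (List.isPrefixOf_iff_prefix.mpr h2)
          · exact hni h2
        · intro hni h2
          exact hni (Or.inr h2)

-- Python truth of 's.count(sub) == 0' coincides with 'sub not in s'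
lemma tGet_count_zero_iff (t sub : List Char) :
    PySem.Chars.count t sub = 0 ↔ PySem.Chars.isIn sub t = false := by
  by_cases hsub : sub = []
  · simp [PySem.Chars.count, PySem.Chars.isIn, hsub]
  · rw [PySem.Chars.isIn_eq_false_iff]
    unfold PySem.Chars.count
    simp only [List.isEmpty_iff, hsub, if_false]
    exact tGet_go_zero_iff sub hsub t.length t (le_refl _)

lemma tGet_sum_zero (t : List Char) (l : List String)
    (h : ∀ x ∈ l, PySem.Chars.isIn x.toList t = false) :
    (l.map (fun el => PySem.Chars.count t el.toList)).sum = 0 := by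
  induction l with
  | nil => simp
  | cons s rest ih =>
    simp only [List.map_cons, List.sum_cons]
    have h1 : PySem.Chars.count t s.toList = 0 :=
      (tGet_count_zero_iff t s.toList).mpr (h s (by simp))
    rw [h1, ih (fun x hx => h x (by simp [hx]))]

lemma tGet_main (laTs_s : String) : ∀ (l : List String),
    l.countP (fun l_s => PySem.Chars.isIn l_s.toList laTs_s.toList) ≤ 1 →
    tGetIsValiSep_fef laTs_s l = tGetIsValiSep_fef_alt laTs_s l := by
  intro l
  induction l with
  | nil => intro _; rfl
  | cons s rest ih =>
    intro hpre
    rw [List.countP_cons] at hpre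
    by_cases hin : PySem.Chars.isIn s.toList laTs_s.toList = true
    · -- head separator occurs: everything in rest must be absent
      have hcnt : rest.countP (fun l_s => PySem.Chars.isIn l_s.toList laTs_s.toList) = 0 := by
        simp only [hin, if_true] at hpre; omega
      have hrest : ∀ x ∈ rest, PySem.Chars.isIn x.toList laTs_s.toList = false := by
        intro x hx
        simpa using List.countP_eq_zero.mp hcnt x hx
      have hc : PySem.Chars.count laTs_s.toList s.toList ≠ 0 := by
        intro h0
        rw [tGet_count_zero_iff] at h0
        simp [h0] at hin
      have hsum : (rest.map (fun el => PySem.Chars.count laTs_s.toList el.toList)).sum = 0 :=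
        tGet_sum_zero laTs_s.toList rest hrest
      have hfilt : rest.filter (fun l_s => PySem.Chars.isIn l_s.toList laTs_s.toList) = [] :=
        List.filter_eq_nil_iff.mpr (fun x hx => by simp [hrest x hx])
      simp only [tGetIsValiSep_fef, tGetIsValiSep_fef_alt, List.map_cons, List.sum_cons,
        List.zip_cons_cons, List.filter_cons, PySem.Str.count_eq, PySem.Str.isIn_eq, hin,
        if_true, hsum, Nat.add_zero, hfilt]
      rw [if_neg hc]
      simp [tGetLoop, hc]
    · -- head separator absent: both programs ignore it
      have hin' : PySem.Chars.isIn s.toList laTs_s.toList = false := by simpa using hin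
      have hc : PySem.Chars.count laTs_s.toList s.toList = 0 :=
        (tGet_count_zero_iff laTs_s.toList s.toList).mpr hin'
      have hpre' : rest.countP (fun l_s => PySem.Chars.isIn l_s.toList laTs_s.toList) ≤ 1 := by
        simp only [hin', Bool.false_eq_true, if_false] at hpre
        simpa using hpre
      have hA : tGetIsValiSep_fef laTs_s (s :: rest) = tGetIsValiSep_fef laTs_s rest := by
        simp only [tGetIsValiSep_fef, List.map_cons, List.sum_cons, PySem.Str.count_eq, hc,
          Nat.zero_add, List.zip_cons_cons]
        split
        · rfl
        · simp [tGetLoop]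
      have hB : tGetIsValiSep_fef_alt laTs_s (s :: rest) = tGetIsValiSep_fef_alt laTs_s rest := by
        simp only [tGetIsValiSep_fef_alt, List.filter_cons, PySem.Str.isIn_eq, hin',
          Bool.false_eq_true, if_false]
      rw [hA, hB, ih hpre']

-- ===== VERDICT (by name: the statement is the Claim_ definition above) =====
theorem tGetIsValiSep_fef_spec : Claim_equal_tGetIsValiSep_fef := by
  intro laTs_s laSep_t _ hpre
  unfold Pre_tGetIsValiSep_fef at hpre
  simp only [PySem.Str.isIn_eq] at hpre
  exact tGet_main laTs_s laSep_t hpre
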